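-- pv_equiv track=rewrite | github.com/RomanMartin1/parcial2-mutantes | mutantes.py | diagonalesHaciaDerecha
-- ===== SOURCE A (Python) =====
-- def diagonalesHaciaDerecha(matriz):
--     filas = len(matriz)
--     columnas = len(matriz[0])
--     diagonales = []
--
--     for suma_indices in range(filas + columnas - 1):
--         if suma_indices % 2 == 0:
--             for fila in range(min(suma_indices, filas - 1), max(0, suma_indices - columnas + 1) - 1, -1):
--                 columna = columnas - 1 - (suma_indices - fila)
--                 diagonales.append(matriz[fila][columna])
--         else:
--             for fila in range(max(0, suma_indices - columnas + 1), min(suma_indices, filas - 1) + 1):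
--                 columna = columnas - 1 - (suma_indices - fila)
--                 diagonales.append(matriz[fila][columna])
--     return CuatroConsecutivos(diagonales)
--
-- def  CuatroConsecutivos(lista):
--     contador = 0
--     for i in range(len(lista) - 3):
--         if lista[i] == lista[i + 1] == lista[i + 2] == lista[i + 3]:
--             contador = contador + 1
--     return contador
-- ===== SOURCE B (Python) =====
-- def diagonalesHaciaDerecha(matriz):
--     columnas = len(matriz[0])
--     buckets = {}
--     for fila in range(len(matriz)):
--         for columna in range(columnas):
--             buckets.setdefault(fila - columna, []).append(matriz[fila][columna])
--     plana = []
--     for d in range(-(columnas - 1), len(matriz)):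
--         bucket = buckets.get(d, [])
--         if (d + columnas - 1) % 2 == 0:
--             bucket = bucket[::-1]
--         plana += bucket
--     contador = 0
--     for a, b, c, e in zip(plana, plana[1:], plana[2:], plana[3:]):
--         if a == b == c == e:
--             contador += 1
--     return contador
-- ===== Notes on version B (the rewrite author's own statement) =====
-- stated objective: alternative
-- what changed: Replaces A's per-antidiagonal index arithmetic (direction-switched inner range loops) by a single row-major scan that groups cells into dict buckets keyed by fila-columna, then flattens the buckets (reversing on even parity) and counts runs of four with a zip-of-shifted-lists pass instead of an index loop.
import Mathlib
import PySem

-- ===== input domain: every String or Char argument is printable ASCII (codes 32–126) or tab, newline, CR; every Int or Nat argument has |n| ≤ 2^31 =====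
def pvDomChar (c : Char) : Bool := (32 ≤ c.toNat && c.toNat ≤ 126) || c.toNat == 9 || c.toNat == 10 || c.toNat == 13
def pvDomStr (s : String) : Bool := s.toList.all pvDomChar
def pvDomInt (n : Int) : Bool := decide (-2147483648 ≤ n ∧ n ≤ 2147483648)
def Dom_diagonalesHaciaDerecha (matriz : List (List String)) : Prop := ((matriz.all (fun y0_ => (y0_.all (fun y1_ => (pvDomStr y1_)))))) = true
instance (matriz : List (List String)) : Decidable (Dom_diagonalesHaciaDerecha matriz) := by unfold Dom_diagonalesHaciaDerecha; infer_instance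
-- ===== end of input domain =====

-- B groups the cells into diagonal buckets by one row-major scan (dict keyed by fila-columna) and
-- counts runs of four by zipping shifted lists, instead of A's per-antidiagonal index loops.

-- ===== PORT A =====
-- helper CuatroConsecutivos, transliterated
def cuatroConsecutivos (lista : List String) : Int :=
  (PySem.List.pyRange 0 ((lista.length : Int) - 3) 1).foldl
    (fun contador i =>
      if (PySem.List.pyGetD lista i "" == PySem.List.pyGetD lista (i + 1) ""
          && PySem.List.pyGetD lista (i + 1) "" == PySem.List.pyGetD lista (i + 2) ""
          && PySem.List.pyGetD lista (i + 2) "" == PySem.List.pyGetD lista (i + 3) "") = true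
      then contador + 1 else contador) 0

def diagonalesHaciaDerecha (matriz : List (List String)) : Int :=
  let filas : Int := matriz.length
  let columnas : Int := ((PySem.List.pyGetD matriz 0 []).length : Int)
  let diagonales : List String :=
    (PySem.List.pyRange 0 (filas + columnas - 1) 1).foldl
      (fun diagonales suma_indices =>
        if PySem.Int.mod suma_indices 2 = 0 then
          (PySem.List.pyRange (min suma_indices (filas - 1)) (max 0 (suma_indices - columnas + 1) - 1) (-1)).foldl
            (fun diagonales fila =>
              diagonales ++ [PySem.List.pyGetD (PySem.List.pyGetD matriz fila []) (columnas - 1 - (suma_indices - fila)) ""])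
            diagonales
        else
          (PySem.List.pyRange (max 0 (suma_indices - columnas + 1)) (min suma_indices (filas - 1) + 1) 1).foldl
            (fun diagonales fila =>
              diagonales ++ [PySem.List.pyGetD (PySem.List.pyGetD matriz fila []) (columnas - 1 - (suma_indices - fila)) ""])
            diagonales) []
  cuatroConsecutivos diagonales

-- ===== PORT B =====
def diagonalesHaciaDerecha_alt (matriz : List (List String)) : Int :=
  let columnas : Int := ((PySem.List.pyGetD matriz 0 []).length : Int)
  let buckets : PySem.Dict Int (List String) :=
    (PySem.List.pyRange 0 (matriz.length : Int) 1).foldl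
      (fun buckets fila =>
        (PySem.List.pyRange 0 columnas 1).foldl
          (fun buckets columna =>
            buckets.modify (fila - columna) []
              (fun b => b ++ [PySem.List.pyGetD (PySem.List.pyGetD matriz fila []) columna ""]))
          buckets)
      PySem.Dict.empty
  let plana : List String :=
    (PySem.List.pyRange (-(columnas - 1)) (matriz.length : Int) 1).foldl
      (fun plana d =>
        let bucket := buckets.getD d []
        -- bucket[::-1] is List.reverse (PySem.List.slice?_none_none_neg_one)
        plana ++ (if PySem.Int.mod (d + columnas - 1) 2 = 0 then bucket.reverse else bucket))
      []
  ((plana.zip (PySem.List.slice plana (some 1) none)).zip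
      ((PySem.List.slice plana (some 2) none).zip (PySem.List.slice plana (some 3) none))).foldl
    (fun contador q =>
      if (q.1.1 == q.1.2 && q.1.2 == q.2.1 && q.2.1 == q.2.2) = true
      then contador + 1 else contador) 0

-- ===== PRECONDITION & SPEC =====
-- Pre_ excludes exactly the inputs where the Python raises IndexError: the empty matrix
-- (matriz[0]) and matrices with a row shorter than the first row (matriz[fila][columna]).
def Pre_diagonalesHaciaDerecha (matriz : List (List String)) : Prop :=
  matriz ≠ [] ∧ ∀ row ∈ matriz, (matriz.headD []).length ≤ row.length
instance (matriz : List (List String)) : Decidable (Pre_diagonalesHaciaDerecha matriz) := by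
  unfold Pre_diagonalesHaciaDerecha; infer_instance
def pvWitness_diagonalesHaciaDerecha : List (List String) := [["a", "b"], ["b", "a"]]

def Spec_diagonalesHaciaDerecha (matriz : List (List String)) (out : Int) : Prop := out = diagonalesHaciaDerecha_alt matriz
instance (matriz : List (List String)) (out : Int) : Decidable (Spec_diagonalesHaciaDerecha matriz out) := by unfold Spec_diagonalesHaciaDerecha; infer_instance

-- ===== CLAIM (what is proved, stated in full; the proofs are below) =====
def Claim_equal_diagonalesHaciaDerecha : Prop := ∀ (matriz : List (List String)), Dom_diagonalesHaciaDerecha matriz → Pre_diagonalesHaciaDerecha matriz → Spec_diagonalesHaciaDerecha matriz (diagonalesHaciaDerecha matriz)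

-- ===== LEMMAS AND PROOFS =====

-- the cell matriz[f][c], total form
def elemAt (matriz : List (List String)) (f c : Int) : String :=
  PySem.List.pyGetD (PySem.List.pyGetD matriz f []) c ""

-- the diagonal with key d = fila - columna, cells in increasing fila order
def chunk (matriz : List (List String)) (n d : Int) : List String :=
  (PySem.List.pyRange (max 0 d) (min (d + n) (matriz.length : Int)) 1).map
    (fun f => elemAt matriz f (f - d))

-- filtering an integer range for one value
theorem filter_eq_pyRange (a b x : Int) :
    (PySem.List.pyRange a b 1).filter (fun c => c == x) = if a ≤ x ∧ x < b then [x] else [] := by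
  by_cases h : a < b
  · rw [PySem.List.pyRange_one_cons h, List.filter_cons, filter_eq_pyRange (a+1) b x]
    by_cases hx : a = x
    · subst hx
      simp only [BEq.rfl, if_true]
      rw [if_neg (show ¬(a + 1 ≤ a ∧ a < b) by omega), if_pos ⟨le_refl a, h⟩]
    · have hb : (a == x) = false := by simpa using hx
      simp only [hb, Bool.false_eq_true, if_false]
      by_cases h1 : a ≤ x ∧ x < b
      · rw [if_pos (by omega), if_pos h1]
      · rw [if_neg (by omega), if_neg h1]
  · rw [PySem.List.pyRange_one_eq_nil (by omega), if_neg (by omega)]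
    rfl
termination_by (b - a).toNat
decreasing_by omega

-- the flatMap of a point test over [0, m) is the map over the clipped interval
theorem flatMap_if_interval (m d n : Int) (g : Int → String) :
    (PySem.List.pyRange 0 m 1).flatMap
        (fun f => if d ≤ f ∧ f < d + n then [g f] else []) =
      (PySem.List.pyRange (max 0 d) (min (d + n) m) 1).map g := by
  set lo := max 0 d with hlo
  set hi := min (d + n) m with hhi
  by_cases hle : lo ≤ hi
  · rw [PySem.List.pyRange_one_append 0 lo m (by omega) (by omega),
        PySem.List.pyRange_one_append lo hi m hle (by omega),
        List.flatMap_append, List.flatMap_append]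
    have h1 : (PySem.List.pyRange 0 lo 1).flatMap (fun f => if d ≤ f ∧ f < d + n then [g f] else []) = [] := by
      apply List.flatMap_eq_nil_iff.mpr
      intro f hf
      rw [PySem.List.mem_pyRange_one] at hf
      rw [if_neg (by omega)]
    have h3 : (PySem.List.pyRange hi m 1).flatMap (fun f => if d ≤ f ∧ f < d + n then [g f] else []) = [] := by
      apply List.flatMap_eq_nil_iff.mpr
      intro f hf
      rw [PySem.List.mem_pyRange_one] at hf
      rw [if_neg (by omega)]
    have h2 : (PySem.List.pyRange lo hi 1).flatMap (fun f => if d ≤ f ∧ f < d + n then [g f] else []) =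
        (PySem.List.pyRange lo hi 1).map g := by
      have e : ∀ f ∈ PySem.List.pyRange lo hi 1, (if d ≤ f ∧ f < d + n then [g f] else []) = [g f] := by
        intro f hf
        rw [PySem.List.mem_pyRange_one] at hf
        rw [if_pos (by omega)]
      rw [List.flatMap_congr e, ← List.map_eq_flatMap]
    rw [h1, h2, h3]
    simp
  · rw [show PySem.List.pyRange lo hi 1 = [] from PySem.List.pyRange_one_eq_nil (by omega)]
    rw [List.map_nil]
    apply List.flatMap_eq_nil_iff.mpr
    intro f hf
    rw [PySem.List.mem_pyRange_one] at hf
    rw [if_neg (by omega)]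

-- an if on the accumulator side of an append loop moves inside the append
theorem foldl_if_append {α β : Type} (p : α → Prop) [DecidablePred p] (u v : α → List β)
    (l : List α) (acc : List β) :
    l.foldl (fun acc x => if p x then acc ++ u x else acc ++ v x) acc =
      acc ++ l.flatMap (fun x => if p x then u x else v x) := by
  have e : (fun (acc : List β) x => if p x then acc ++ u x else acc ++ v x) =
      (fun acc x => acc ++ (if p x then u x else v x)) := by
    funext acc x
    split_ifs <;> rfl
  rw [e, PySem.List.foldl_append_eq_flatMap]

-- B's 4-window zip list, written as an index map
theorem zip4_eq (l : List String) :
    ((l.zip (PySem.List.slice l (some 1) none)).zip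
        ((PySem.List.slice l (some 2) none).zip (PySem.List.slice l (some 3) none))) =
      (List.range (l.length - 3)).map
        (fun (k : Nat) => ((PySem.List.pyGetD l (k : Int) "", PySem.List.pyGetD l ((k : Int) + 1) ""),
                   (PySem.List.pyGetD l ((k : Int) + 2) "", PySem.List.pyGetD l ((k : Int) + 3) ""))) := by
  rw [PySem.List.slice_from l (by norm_num : (0:Int) ≤ 1),
      PySem.List.slice_from l (by norm_num : (0:Int) ≤ 2),
      PySem.List.slice_from l (by norm_num : (0:Int) ≤ 3)]
  have t1 : (1:Int).toNat = 1 := rfl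
  have t2 : (2:Int).toNat = 2 := rfl
  have t3 : (3:Int).toNat = 3 := rfl
  rw [t1, t2, t3]
  apply List.ext_getElem
  · simp only [List.length_zip, List.length_drop, List.length_map, List.length_range]
    omega
  · intro i h1 h2
    simp only [List.length_zip, List.length_drop, List.length_map, List.length_range] at h1 h2
    have hi : i < l.length - 3 := by omega
    simp only [List.getElem_zip, List.getElem_drop, List.getElem_map, List.getElem_range]
    rw [PySem.List.pyGetD_eq_getElem l "" (by omega) (by omega),
        PySem.List.pyGetD_eq_getElem l "" (by omega) (by omega),
        PySem.List.pyGetD_eq_getElem l "" (by omega) (by omega),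
        PySem.List.pyGetD_eq_getElem l "" (by omega) (by omega)]
    simp only [show ((i : Int)).toNat = i from by omega,
        show ((i : Int) + 1).toNat = i + 1 from by omega,
        show ((i : Int) + 2).toNat = i + 2 from by omega,
        show ((i : Int) + 3).toNat = i + 3 from by omega]
    simp only [show 1 + i = i + 1 from by omega, show 2 + i = i + 2 from by omega,
        show 3 + i = i + 3 from by omega]

-- A's index-loop run counter equals B's zip-of-shifts counter, on every list
theorem counter_eq (l : List String) :
    cuatroConsecutivos l =
      ((l.zip (PySem.List.slice l (some 1) none)).zip
          ((PySem.List.slice l (some 2) none).zip (PySem.List.slice l (some 3) none))).foldl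
        (fun contador q =>
          if (q.1.1 == q.1.2 && q.1.2 == q.2.1 && q.2.1 == q.2.2) = true
          then contador + 1 else contador) 0 := by
  rw [cuatroConsecutivos, zip4_eq]
  rw [PySem.List.foldl_count_if, PySem.List.foldl_count_if]
  rw [PySem.List.pyRange_one, List.countP_map, List.countP_map]
  rw [show ((l.length : Int) - 3 - 0).toNat = l.length - 3 from by omega]
  norm_cast
  simp only [Nat.zero_add]
  apply List.countP_congr
  intro k hk
  simp only [Function.comp_apply]
  push_cast
  exact Iff.rfl

-- the bucket B's row-major scan builds for key d is exactly the diagonal chunk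
theorem bucket_eq (matriz : List (List String)) (n d : Int) :
    (((PySem.List.pyRange 0 (matriz.length : Int) 1).foldl
        (fun buckets fila =>
          (PySem.List.pyRange 0 n 1).foldl
            (fun buckets columna =>
              buckets.modify (fila - columna) []
                (fun b => b ++ [PySem.List.pyGetD (PySem.List.pyGetD matriz fila []) columna ""]))
            buckets)
        PySem.Dict.empty : PySem.Dict Int (List String)).getD d []) = chunk matriz n d := by
  have step12 :
      ((PySem.List.pyRange 0 (matriz.length : Int) 1).foldl
        (fun buckets fila =>
          (PySem.List.pyRange 0 n 1).foldl
            (fun buckets columna =>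
              buckets.modify (fila - columna) []
                (fun b => b ++ [PySem.List.pyGetD (PySem.List.pyGetD matriz fila []) columna ""]))
            buckets)
        (PySem.Dict.empty : PySem.Dict Int (List String))) =
      ((PySem.List.pyRange 0 (matriz.length : Int) 1).flatMap
          (fun fila => (PySem.List.pyRange 0 n 1).map (fun c => (fila - c, elemAt matriz fila c)))).foldl
        (fun buckets p => buckets.modify p.1 [] (fun b => b ++ [p.2])) PySem.Dict.empty := by
    rw [List.foldl_flatMap]
    simp only [List.foldl_map]
    rfl
  rw [step12, PySem.Dict.getD_foldl_modify_append, PySem.Dict.getD_empty, List.nil_append]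
  rw [List.filter_flatMap, List.map_flatMap]
  rw [chunk, ← flatMap_if_interval (matriz.length : Int) d n]
  apply List.flatMap_congr
  intro fila _
  rw [List.filter_map]
  have hcond : ((fun p => p.1 == d) ∘ fun c => (fila - c, elemAt matriz fila c)) = fun c => c == fila - d := by
    funext c
    simp only [Function.comp_apply]
    by_cases h : fila - c = d
    · simp [show c = fila - d from by omega]
    · have h2 : ¬ (c = fila - d) := by omega
      simp [h, h2]
  rw [hcond, filter_eq_pyRange 0 n (fila - d)]
  by_cases h : 0 ≤ fila - d ∧ fila - d < n
  · rw [if_pos h, if_pos (by omega)]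
    simp [elemAt]
  · rw [if_neg h, if_neg (by omega)]
    simp

-- the two programs agree on every input
-- A's per-antidiagonal slice, rewritten as a chunk
theorem chunkA_eq (matriz : List (List String)) (n suma : Int) :
    (PySem.List.pyRange (max 0 (suma - n + 1)) (min suma ((matriz.length : Int) - 1) + 1) 1).map
      (fun fila => PySem.List.pyGetD (PySem.List.pyGetD matriz fila []) (n - 1 - (suma - fila)) "") =
    chunk matriz n (suma - n + 1) := by
  rw [chunk]
  rw [show min suma ((matriz.length : Int) - 1) + 1 = min (suma - n + 1 + n) (matriz.length : Int) from by omega]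
  apply List.map_congr_left
  intro f _
  rw [elemAt]
  congr 1
  ring

theorem main_eq (matriz : List (List String)) :
    diagonalesHaciaDerecha matriz = diagonalesHaciaDerecha_alt matriz := by
  rw [diagonalesHaciaDerecha, diagonalesHaciaDerecha_alt]
  rw [← counter_eq]
  simp only [PySem.List.foldl_append_singleton_eq_map, PySem.List.pyRange_neg_one_eq_reverse,
    List.map_reverse, sub_add_cancel]
  rw [foldl_if_append, PySem.List.foldl_append_eq_flatMap, List.nil_append, List.nil_append]
  simp only [bucket_eq]
  congr 1
  rw [PySem.List.pyRange_one, PySem.List.pyRange_one, List.flatMap_map, List.flatMap_map]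
  rw [show ((matriz.length : Int) - -(((PySem.List.pyGetD matriz 0 []).length : Int) - 1)).toNat =
      (((matriz.length : Int) + ((PySem.List.pyGetD matriz 0 []).length : Int) - 1) - 0).toNat from by omega]
  apply List.flatMap_congr
  intro k _
  have hsuma : (0 : Int) + (k : Int) = (-(((PySem.List.pyGetD matriz 0 []).length : Int) - 1) + (k : Int)) +
      ((PySem.List.pyGetD matriz 0 []).length : Int) - 1 := by ring
  rw [← hsuma]
  rw [chunkA_eq matriz ((PySem.List.pyGetD matriz 0 []).length : Int) ((0 : Int) + (k : Int))]
  rw [show (0 : Int) + (k : Int) - ((PySem.List.pyGetD matriz 0 []).length : Int) + 1 =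
      -(((PySem.List.pyGetD matriz 0 []).length : Int) - 1) + (k : Int) from by ring]

-- ===== VERDICT (by name: the statement is the Claim_ definition above) =====
theorem diagonalesHaciaDerecha_spec : Claim_equal_diagonalesHaciaDerecha := by
  intro matriz _ _
  unfold Spec_diagonalesHaciaDerecha
  exact main_eq matriz
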